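-- pv_equiv track=rewrite | github.com/ssolllll/Coding_test_practice | Programmers_Lv.0/피자 나눠 먹기 (2).py | solution
-- ===== SOURCE A (Python) =====
-- def solution(n):
--     for v in range(1,n+1):
--         if 1<=n<=3:
--             return 1
--         elif n == 4:
--             return 2
--         elif n == 5:
--             return 5
--         elif (n*v)%6 == 0:
--             return n*v//6
-- ===== SOURCE B (Python) =====
-- from math import gcd
--
--
-- def solution(n):
--     # closed form: smallest k with n*k divisible by 6 is 6//gcd(n,6),
--     # and the answer n*k//6 equals n//gcd(n,6)
--     return n // gcd(n, 6)
-- ===== Notes on version B (the rewrite author's own statement) =====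
-- stated objective: simpler
-- what changed: Replaced A's bounded search loop and its special-case branches for small inputs by the single closed-form arithmetic expression n // gcd(n, 6), which equals the smallest whole number of pizzas whose six slices divide evenly among n people.
-- outside the precondition, e.g. on solution(0): A returns None, B returns 0; on solution(-2): A returns None, B returns -1
import Mathlib
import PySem

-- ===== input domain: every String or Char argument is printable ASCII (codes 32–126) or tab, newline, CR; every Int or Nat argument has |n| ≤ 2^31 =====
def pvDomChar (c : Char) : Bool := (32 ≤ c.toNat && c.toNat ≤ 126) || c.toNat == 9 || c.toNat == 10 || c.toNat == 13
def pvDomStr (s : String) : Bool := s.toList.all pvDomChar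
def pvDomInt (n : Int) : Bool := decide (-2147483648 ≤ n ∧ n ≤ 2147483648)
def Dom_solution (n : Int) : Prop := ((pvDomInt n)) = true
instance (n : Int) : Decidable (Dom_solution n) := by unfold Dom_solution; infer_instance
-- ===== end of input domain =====

-- B replaces A's bounded search loop by the closed form n // gcd(n, 6) (objective: simpler).


-- ===== PORT A =====
-- the for-loop with early returns; `none` = the loop falls through (Python returns None)
def solutionLoop (n : Int) : List Int → Option Int
  | [] => none
  | v :: vs =>
    if 1 ≤ n ∧ n ≤ 3 then some 1
    else if n = 4 then some 2
    else if n = 5 then some 5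
    else if PySem.Int.mod (n * v) 6 = 0 then some (PySem.Int.floordiv (n * v) 6)
    else solutionLoop n vs

def solution (n : Int) : Int :=
  (solutionLoop n (PySem.List.pyRange 1 (n + 1) 1)).getD 0

-- ===== PORT B =====
def solution_alt (n : Int) : Int :=
  PySem.Int.floordiv n (Int.gcd n 6 : Int)

-- ===== PRECONDITION & SPEC =====
-- Pre_ excludes n ≤ 0, where A's loop body never runs and A returns None (no Int value).
def Pre_solution (n : Int) : Prop := 1 ≤ n
instance (n : Int) : Decidable (Pre_solution n) := by unfold Pre_solution; infer_instance
def pvWitness_solution : Int := 10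

def Spec_solution (n : Int) (out : Int) : Prop := out = solution_alt n
instance (n : Int) (out : Int) : Decidable (Spec_solution n out) := by unfold Spec_solution; infer_instance

-- ===== CLAIM (what is proved, stated in full; the proofs are below) =====
def Claim_equal_solution : Prop := ∀ (n : Int), Dom_solution n → Pre_solution n → Spec_solution n (solution n)

-- ===== LEMMAS AND PROOFS =====

theorem pyRange_peel6 (n : Int) (hn : 6 ≤ n) :
    PySem.List.pyRange 1 (n + 1) 1 = 1 :: 2 :: 3 :: 4 :: 5 :: 6 :: PySem.List.pyRange 7 (n + 1) 1 := by
  rw [PySem.List.pyRange_one_cons (by omega), PySem.List.pyRange_one_cons (by omega),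
      PySem.List.pyRange_one_cons (by omega), PySem.List.pyRange_one_cons (by omega),
      PySem.List.pyRange_one_cons (by omega), PySem.List.pyRange_one_cons (by omega)]
  norm_num

theorem gcd_eq_gcd_emod (n : Int) : (Int.gcd n 6 : Int) = (Int.gcd (n % 6) 6 : Int) := by
  rw [Int.gcd_emod]

theorem solution_eq_alt_of_big (n : Int) (hn : 6 ≤ n) : solution n = solution_alt n := by
  unfold solution solution_alt
  rw [pyRange_peel6 n hn]
  have h1 : ¬ (1 ≤ n ∧ n ≤ 3) := by omega
  have h4 : ¬ (n = 4) := by omega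
  have h5 : ¬ (n = 5) := by omega
  simp only [solutionLoop, h1, h4, h5, if_false]
  simp only [PySem.Int.mod_eq_emod_of_pos (show (0:Int) < 6 by norm_num),
      PySem.Int.floordiv_eq_ediv_of_pos (show (0:Int) < 6 by norm_num)]
  have hr : n % 6 = 0 ∨ n % 6 = 1 ∨ n % 6 = 2 ∨ n % 6 = 3 ∨ n % 6 = 4 ∨ n % 6 = 5 := by omega
  rcases hr with h | h | h | h | h | h <;>
  · rw [gcd_eq_gcd_emod, h]
    norm_num
    split_ifs <;> simp only [Option.getD_some] <;> omega

-- ===== VERDICT (by name: the statement is the Claim_ definition above) =====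
theorem solution_spec : Claim_equal_solution := by
  intro n _ hpre
  unfold Spec_solution
  by_cases hbig : 6 ≤ n
  · exact solution_eq_alt_of_big n hbig
  · have : n = 1 ∨ n = 2 ∨ n = 3 ∨ n = 4 ∨ n = 5 := by
      unfold Pre_solution at hpre; omega
    rcases this with rfl | rfl | rfl | rfl | rfl <;> decide
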